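-- pv_equiv track=rewrite | github.com/Swithord/hong-kong-legco-transcript | parse.py | remove_after_keyword
-- ===== SOURCE A (Python) =====
-- def remove_after_keyword(text, keyword):
--     if not text:
--         return ''
--     lines = text.split('\n')
--     for i in range(len(lines) - 1, -1, -1):
--         if keyword in lines[i]:
--             return '\n'.join(lines[:i + 1])
--     return text
-- ===== SOURCE B (Python) =====
-- def remove_after_keyword(text, keyword):
--     if not text:
--         return ''
--     end = len(text)
--     pos = 0
--     for line in text.split('\n'):
--         pos += len(line)
--         if keyword in line:
--             end = pos
--         pos += 1
--     return text[:end]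
-- ===== Notes on version B (the rewrite author's own statement) =====
-- stated objective: alternative
-- what changed: Instead of scanning the split lines backwards and re-joining a prefix of the list, B makes one forward pass over the lines maintaining the running offset and the cut position of the last matching line, and returns a slice of the original text.
import Mathlib
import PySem

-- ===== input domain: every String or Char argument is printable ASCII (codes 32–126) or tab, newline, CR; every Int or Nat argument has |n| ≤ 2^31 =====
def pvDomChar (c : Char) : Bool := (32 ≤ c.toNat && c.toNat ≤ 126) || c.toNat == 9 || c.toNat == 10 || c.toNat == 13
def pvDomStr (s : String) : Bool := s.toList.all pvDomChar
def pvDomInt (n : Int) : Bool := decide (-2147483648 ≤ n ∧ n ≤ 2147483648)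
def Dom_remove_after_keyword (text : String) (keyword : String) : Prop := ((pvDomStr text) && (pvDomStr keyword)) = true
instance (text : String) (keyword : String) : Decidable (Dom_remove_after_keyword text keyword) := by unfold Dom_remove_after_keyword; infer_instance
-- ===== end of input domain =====

-- B replaces A's backward scan over the split lines and re-join of a prefix by one forward
-- pass that maintains the cut offset of the last matching line and slices the original text
-- (objective: alternative — same O(n) cost, different traversal, no join).

-- ===== PORT A =====
def remove_after_keyword (text : String) (keyword : String) : String :=
  let t := text.toList
  if t = [] then "" else
    let lines := PySem.Chars.splitOn t ['\n']
    match (PySem.List.pyRange ((lines.length : Int) - 1) (-1) (-1)).find?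
        (fun i => PySem.Chars.isIn keyword.toList (PySem.List.pyGetD lines i [])) with
    | some i => String.ofList (PySem.Chars.join ['\n'] (PySem.List.slice lines none (some (i + 1))))
    | none => text

-- ===== PORT B =====
def remove_after_keyword_alt (text : String) (keyword : String) : String :=
  let t := text.toList
  if t = [] then "" else
    let st := (PySem.Chars.splitOn t ['\n']).foldl
        (fun (st : Int × Int) line =>
          let pos := st.2 + (line.length : Int)
          (if PySem.Chars.isIn keyword.toList line then pos else st.1, pos + 1))
        ((t.length : Int), 0)
    String.ofList (PySem.Chars.slice t none (some st.1))

-- ===== PRECONDITION & SPEC =====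
def Spec_remove_after_keyword (text : String) (keyword : String) (out : String) : Prop := out = remove_after_keyword_alt text keyword
instance (text : String) (keyword : String) (out : String) : Decidable (Spec_remove_after_keyword text keyword out) := by unfold Spec_remove_after_keyword; infer_instance

-- ===== CLAIM (what is proved, stated in full; the proofs are below) =====
def Claim_equal_remove_after_keyword : Prop := ∀ (text : String) (keyword : String), Dom_remove_after_keyword text keyword → Spec_remove_after_keyword text keyword (remove_after_keyword text keyword)

-- ===== LEMMAS AND PROOFS =====

-- index (from the left) of the last line containing the keyword, computed on the reversed line list
def pvCutR (k : List Char) : List (List Char) → Option Nat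
  | [] => none
  | l :: r => if PySem.Chars.isIn k l then some r.length else pvCutR k r

-- total size of the lines, counting one separator per line
def pvSz : List (List Char) → Nat
  | [] => 0
  | l :: r => l.length + 1 + pvSz r

lemma pvCutR_lt (k : List Char) : ∀ (r : List (List Char)) (i : Nat), pvCutR k r = some i → i < r.length := by
  intro r
  induction r with
  | nil => intro i h; simp [pvCutR] at h
  | cons l r ih =>
    intro i h
    simp only [List.length_cons]
    by_cases hl : PySem.Chars.isIn k l
    · simp [pvCutR, hl] at h; omega
    · exact Nat.lt_succ_of_lt (ih i (by simpa [pvCutR, hl] using h))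

lemma pvSz_append (ls : List (List Char)) (l : List Char) :
    pvSz (ls ++ [l]) = pvSz ls + (l.length + 1) := by
  induction ls with
  | nil => simp [pvSz]
  | cons x xs ih => simp [pvSz, ih]; omega

-- PySem's fuelled splitOn on a one-character separator is Mathlib's splitOnP
lemma pv_go (c : Char) : ∀ (fuel : Nat) (l cur : List Char) (accs : List (List Char)),
    l.length ≤ fuel →
    PySem.Chars.splitOn.go [c] fuel l cur accs
      = accs.reverse ++ (List.splitOnP (fun a => a == c) l).modifyHead (fun h => cur.reverse ++ h) := by
  intro fuel
  induction fuel with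
  | zero =>
    intro l cur accs hl
    have : l = [] := List.eq_nil_of_length_eq_zero (by omega)
    subst this
    simp [PySem.Chars.splitOn.go, List.splitOnP_nil, List.modifyHead]
  | succ fuel ih =>
    intro l cur accs hl
    cases l with
    | nil => simp [PySem.Chars.splitOn.go, List.splitOnP_nil, List.modifyHead]
    | cons c' rest =>
      rw [PySem.Chars.splitOn.go]
      obtain ⟨h0, t0, hrep⟩ := List.exists_cons_of_ne_nil (List.splitOnP_ne_nil (fun a => a == c) rest)
      by_cases hc : c' = c
      · subst hc
        have hpre : List.isPrefixOf [c'] (c' :: rest) = true := by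
          simp [List.isPrefixOf]
        rw [if_pos hpre]
        rw [ih _ [] _ (by simp at hl ⊢; omega)]
        simp [List.splitOnP_cons, hrep, List.modifyHead]
      · have hpre : List.isPrefixOf [c] (c' :: rest) = false := by
          simp [List.isPrefixOf]; exact fun h => absurd h.symm hc
        rw [if_neg (by simp [hpre])]
        rw [ih rest (c' :: cur) accs (by simp at hl ⊢; omega)]
        have hcc : ((c' == c) = false) := by simp [hc]
        simp [List.splitOnP_cons, hcc, hrep, List.modifyHead]

lemma pv_splitOn_eq (c : Char) (s : List Char) :
    PySem.Chars.splitOn s [c] = List.splitOnP (fun a => a == c) s := by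
  unfold PySem.Chars.splitOn
  rw [pv_go c (s.length + 1) s [] [] (by omega)]
  obtain ⟨h0, t0, hrep⟩ := List.exists_cons_of_ne_nil (List.splitOnP_ne_nil (fun a => a == c) s)
  simp [hrep, List.modifyHead]

lemma pv_intercalate_len : ∀ (ls : List (List Char)), ls ≠ [] →
    (List.intercalate ['\n'] ls).length + 1 = pvSz ls := by
  intro ls
  induction ls with
  | nil => simp
  | cons l tail ih =>
    intro _
    cases tail with
    | nil => simp [List.intercalate, pvSz]
    | cons l2 r =>
      simp only [List.intercalate, List.intersperse_cons₂, List.flatten_cons, pvSz] at ih ⊢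
      simp at ih ⊢
      omega

lemma pv_intercalate_append : ∀ (ls₁ : List (List Char)), ls₁ ≠ [] → ∀ (ls₂ : List (List Char)), ls₂ ≠ [] →
    List.intercalate ['\n'] (ls₁ ++ ls₂)
      = List.intercalate ['\n'] ls₁ ++ '\n' :: List.intercalate ['\n'] ls₂ := by
  intro ls₁
  induction ls₁ with
  | nil => simp
  | cons l tail ih =>
    intro _ ls₂ h₂
    cases tail with
    | nil =>
      obtain ⟨y, r, rfl⟩ := List.exists_cons_of_ne_nil h₂
      simp [List.intercalate, List.intersperse_cons₂]
    | cons l2 r =>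
      have := ih (by simp) ls₂ h₂
      simp only [List.cons_append, List.intercalate, List.intersperse_cons₂, List.flatten_cons] at this ⊢
      simp [this]

lemma pv_take_intercalate (ls : List (List Char)) (i : Nat) (hne : ls ≠ []) :
    (List.intercalate ['\n'] ls).take ((List.intercalate ['\n'] (ls.take (i + 1))).length)
      = List.intercalate ['\n'] (ls.take (i + 1)) := by
  by_cases hd : ls.drop (i + 1) = []
  · have ht : ls.take (i + 1) = ls := List.take_of_length_le (List.drop_eq_nil_iff.mp hd)
    rw [ht, List.take_length]
  · have hsplit : List.intercalate ['\n'] ls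
        = List.intercalate ['\n'] (ls.take (i + 1)) ++ '\n' :: List.intercalate ['\n'] (ls.drop (i + 1)) := by
      conv_lhs => rw [← List.take_append_drop (i + 1) ls]
      exact pv_intercalate_append _ (by simp [List.take_eq_nil_iff, hne]) _ hd
    rw [hsplit, List.take_append_of_le_length (le_refl _), List.take_length]

lemma pv_find?_congr {α : Type} (l : List α) (f g : α → Bool) (h : ∀ x ∈ l, f x = g x) :
    l.find? f = l.find? g := by
  induction l with
  | nil => rfl
  | cons x xs ih =>
    simp only [List.find?]
    rw [h x (by simp)]
    cases g x
    · exact ih (fun y hy => h y (by simp [hy]))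
    · rfl

-- A's backward index scan finds exactly the last matching line
lemma pv_scan (k : List Char) : ∀ (ls : List (List Char)),
    (PySem.List.pyRange ((ls.length : Int) - 1) (-1) (-1)).find?
        (fun i => PySem.Chars.isIn k (PySem.List.pyGetD ls i []))
      = (pvCutR k ls.reverse).map (fun i => (i : Int)) := by
  intro ls
  induction ls using List.reverseRecOn with
  | nil => simp [PySem.List.pyRange_neg_one_eq_nil, pvCutR]
  | append_singleton ls l ih =>
    have hlen : (((ls ++ [l]).length : Int) - 1) = (ls.length : Int) := by simp
    rw [hlen, PySem.List.pyRange_neg_one_cons (by omega)]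
    simp only [List.find?]
    have hget : PySem.List.pyGetD (ls ++ [l]) (ls.length : Int) [] = l := by
      rw [PySem.List.pyGetD_eq_getElem _ _ (by positivity) (by simp)]
      simp
    rw [hget]
    simp only [List.reverse_append, List.reverse_cons, List.reverse_nil, List.nil_append,
      List.singleton_append, pvCutR]
    cases hin : PySem.Chars.isIn k l with
    | true => simp
    | false =>
      simp only [Bool.false_eq_true, if_false]
      rw [pv_find?_congr _ _ (fun i => PySem.Chars.isIn k (PySem.List.pyGetD ls i []))
        (by
          intro x hx
          have hm := PySem.List.mem_pyRange_neg_one.mp hx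
          congr 1
          rw [PySem.List.pyGetD_eq_getElem _ _ (by omega) (by simp; omega),
              PySem.List.pyGetD_eq_getElem _ _ (by omega) (by omega)]
          exact List.getElem_append_left (by omega))]
      exact ih

-- B's forward fold computes the cut position of the last matching line
lemma pv_fold (k : List Char) : ∀ (ls : List (List Char)) (e₀ : Int),
    ls.foldl (fun (st : Int × Int) line =>
        (if PySem.Chars.isIn k line then st.2 + (line.length : Int) else st.1,
         st.2 + (line.length : Int) + 1)) (e₀, 0)
      = ((match pvCutR k ls.reverse with
          | some i => (pvSz (ls.take (i + 1)) : Int) - 1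
          | none => e₀), (pvSz ls : Int)) := by
  intro ls
  induction ls using List.reverseRecOn with
  | nil => intro e₀; simp [pvCutR, pvSz]
  | append_singleton ls l ih =>
    intro e₀
    rw [List.foldl_append, ih e₀]
    simp only [List.foldl_cons, List.foldl_nil, List.reverse_append, List.reverse_cons,
      List.reverse_nil, List.nil_append, List.singleton_append, pvCutR]
    cases hin : PySem.Chars.isIn k l with
    | true =>
      simp only [if_true]
      have h1 : (ls ++ [l]).take (ls.reverse.length + 1) = ls ++ [l] := by
        apply List.take_of_length_le; simp
      rw [h1, pvSz_append]
      simp only [Prod.mk.injEq]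
      refine ⟨by push_cast [pvSz]; ring, by push_cast; ring⟩
    | false =>
      simp only [Bool.false_eq_true, if_false]
      cases hc : pvCutR k ls.reverse with
      | none => simp [pvSz_append]; ring
      | some i =>
        have hi := pvCutR_lt k ls.reverse i hc
        have h2 : (ls ++ [l]).take (i + 1) = ls.take (i + 1) :=
          List.take_append_of_le_length (by simp at hi ⊢; omega)
        simp [h2, pvSz_append]
        ring

-- ===== VERDICT (by name: the statement is the Claim_ definition above) =====
theorem remove_after_keyword_spec : Claim_equal_remove_after_keyword := by
  intro text keyword _
  unfold Spec_remove_after_keyword remove_after_keyword remove_after_keyword_alt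
  by_cases ht0 : text.toList = []
  · simp [ht0]
  · simp only [ht0, if_false, pv_splitOn_eq]
    set t := text.toList with htdef
    set k := keyword.toList
    set L := List.splitOnP (fun a => a == '\n') t with hL
    have hLne : L ≠ [] := List.splitOnP_ne_nil _ t
    have hjoin : List.intercalate ['\n'] L = t := by
      rw [hL]
      exact List.intercalate_splitOn (xs := t) '\n'
    rw [pv_scan, pv_fold]
    cases hc : pvCutR k L.reverse with
    | none =>
      rw [PySem.Chars.slice_eq_listSlice, PySem.List.slice_to _ (by positivity)]
      simp only [Int.toNat_natCast, List.take_length]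
      exact String.ofList_toList.symm
    | some i =>
      have hi : i < L.length := by
        have := pvCutR_lt k L.reverse i hc
        simpa using this
      have htake_ne : L.take (i + 1) ≠ [] := by
        simp [List.take_eq_nil_iff, hLne]
      have hlen := pv_intercalate_len (L.take (i + 1)) htake_ne
      simp only [Option.bind_some, Option.pure_def, Option.map_some, Option.bind_eq_bind]
      rw [PySem.List.slice_to _ (by omega), PySem.Chars.slice_eq_listSlice,
        PySem.List.slice_to _ (by rw [← hlen]; push_cast; linarith [Int.natCast_nonneg ((List.intercalate ['\n'] (List.take (i + 1) L)).length)])]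
      have h1 : ((i : Int) + 1).toNat = i + 1 := by omega
      have h2 : (((pvSz (L.take (i + 1)) : Nat) : Int) - 1).toNat
          = (List.intercalate ['\n'] (L.take (i + 1))).length := by omega
      rw [h1, h2]
      have h3 : t.take ((List.intercalate ['\n'] (L.take (i + 1))).length)
          = List.intercalate ['\n'] (L.take (i + 1)) := by
        conv_lhs => rw [← hjoin]
        exact pv_take_intercalate L i hLne
      rw [h3]
      simp [PySem.Chars.join]
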